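-- pv_equiv track=rewrite | github.com/kevin-ch-day/ScytaleDroid | scytaledroid/StaticAnalysis/modules/permissions/audit.py | _match_permissions
-- ===== SOURCE A (Python) =====
-- from typing import Any, Dict, Iterable, List, Mapping, MutableMapping, Sequence
--
-- def _normalize_perm_token(value: str) -> str:
--     token = str(value or "").strip()
--     if not token:
--         return ""
--     if token.startswith("android.permission."):
--         return token.split(".", maxsplit=2)[-1]
--     return token
--
-- def _match_permissions(
--     declared: Sequence[str],
--     candidates: Sequence[str],
-- ) -> list[str]:
--     if not declared:
--         return []
--     normalized = {perm: _normalize_perm_token(perm).upper() for perm in declared}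
--     candidate_set = {str(candidate).upper() for candidate in candidates}
--     matches = [perm for perm, short in normalized.items() if short in candidate_set]
--     if "AD_ID" in candidate_set:
--         matches.extend(
--             perm
--             for perm in declared
--             if "AD_ID" in perm.upper() and perm not in matches
--         )
--     return matches
-- ===== SOURCE B (Python) =====
-- def _normalize_perm_token(value: str) -> str:
--     token = str(value or "").strip()
--     if not token:
--         return ""
--     if token.startswith("android.permission."):
--         return token[len("android.permission."):]
--     return token
--
-- def _match_permissions(declared, candidates):
--     candidate_set = {str(c).upper() for c in candidates}
--     ad_candidate = "AD_ID" in candidate_set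
--     seen = set()
--     direct = []
--     ad_only = []
--     for perm in declared:
--         if perm in seen:
--             continue
--         seen.add(perm)
--         if _normalize_perm_token(perm).upper() in candidate_set:
--             direct.append(perm)
--         elif ad_candidate and "AD_ID" in perm.upper():
--             ad_only.append(perm)
--     return direct + ad_only
-- ===== Notes on version B (the rewrite author's own statement) =====
-- stated objective: alternative
-- what changed: A builds a full perm->normalized-token dict, then filters it, then runs a second conditional extend pass over declared with repeated list membership tests; B makes a single pass over declared with a seen set, appending each first occurrence to either a direct-match list or an AD_ID-only list and returning their concatenation.
import Mathlib
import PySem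

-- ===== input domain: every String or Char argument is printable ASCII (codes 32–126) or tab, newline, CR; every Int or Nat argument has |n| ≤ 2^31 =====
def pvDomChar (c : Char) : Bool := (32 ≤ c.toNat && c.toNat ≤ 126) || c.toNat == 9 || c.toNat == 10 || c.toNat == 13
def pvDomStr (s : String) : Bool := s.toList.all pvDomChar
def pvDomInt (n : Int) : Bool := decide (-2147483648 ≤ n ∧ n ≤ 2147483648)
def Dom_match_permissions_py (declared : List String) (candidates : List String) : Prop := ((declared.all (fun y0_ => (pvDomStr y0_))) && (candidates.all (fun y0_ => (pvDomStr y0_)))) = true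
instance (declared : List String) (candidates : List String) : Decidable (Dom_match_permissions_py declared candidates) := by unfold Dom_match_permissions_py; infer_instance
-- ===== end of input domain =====

-- B replaces A's normalized-map comprehension followed by a filter pass and a conditional extend pass
-- by a single pass over `declared` with a `seen` set and two output lists (objective: alternative decomposition).

-- ===== PORT A =====
-- _normalize_perm_token as A writes it: strip, empty check, token.split(".", maxsplit=2)[-1]
def pvNormA (value : String) : String :=
  let token := PySem.Str.strip value
  if token = "" then ""
  else if PySem.Str.startswith token "android.permission." then
    ((PySem.Str.splitMax? token "." 2).getD []).getLastD ""
  else token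

def match_permissions_py (declared : List String) (candidates : List String) : List String :=
  if declared = [] then []
  else
    let normalized : PySem.Dict String String :=
      declared.foldl (fun d perm => d.insert perm (PySem.Str.upper (pvNormA perm))) PySem.Dict.empty
    let candidateSet : PySem.Set String := PySem.Set.ofList (candidates.map PySem.Str.upper)
    let matched : List String :=
      (normalized.items.filter (fun ps => PySem.Set.contains candidateSet ps.2)).map Prod.fst
    if PySem.Set.contains candidateSet "AD_ID" then
      declared.foldl
        (fun ms perm =>
          if PySem.Str.isIn "AD_ID" (PySem.Str.upper perm) && !ms.contains perm then ms ++ [perm]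
          else ms)
        matched
    else matched

-- ===== PORT B =====
-- B's normalizer: same strip/empty/prefix tests, but the short token is token[len("android.permission."):]
def pvNormB (value : String) : String :=
  let token := PySem.Str.strip value
  if token = "" then ""
  else if PySem.Str.startswith token "android.permission." then
    PySem.Str.slice token (some (PySem.Str.len "android.permission.")) none
  else token

def match_permissions_py_alt (declared : List String) (candidates : List String) : List String :=
  let candidateSet : PySem.Set String := PySem.Set.ofList (candidates.map PySem.Str.upper)
  let adCandidate := PySem.Set.contains candidateSet "AD_ID"
  let final :=
    declared.foldl
      (fun (st : PySem.Set String × List String × List String) perm =>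
        let seen := st.1
        let direct := st.2.1
        let adOnly := st.2.2
        if PySem.Set.contains seen perm then st
        else
          let seen' := PySem.Set.add seen perm
          if PySem.Set.contains candidateSet (PySem.Str.upper (pvNormB perm)) then
            (seen', direct ++ [perm], adOnly)
          else if adCandidate && PySem.Str.isIn "AD_ID" (PySem.Str.upper perm) then
            (seen', direct, adOnly ++ [perm])
          else (seen', direct, adOnly))
      (PySem.Set.ofList [], [], [])
  final.2.1 ++ final.2.2

-- ===== PRECONDITION & SPEC =====
def Spec_match_permissions_py (declared : List String) (candidates : List String) (out : List String) : Prop := out = match_permissions_py_alt declared candidates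
instance (declared : List String) (candidates : List String) (out : List String) : Decidable (Spec_match_permissions_py declared candidates out) := by unfold Spec_match_permissions_py; infer_instance

-- ===== CLAIM (what is proved, stated in full; the proofs are below) =====
def Claim_equal_match_permissions_py : Prop := ∀ (declared : List String) (candidates : List String), Dom_match_permissions_py declared candidates → Spec_match_permissions_py declared candidates (match_permissions_py declared candidates)

-- ===== LEMMAS AND PROOFS =====

theorem goM0 (sep : List Char) (fuel : Nat) (l cur : List Char) (acc : List (List Char)) :
    PySem.Chars.splitOnMax.go sep fuel 0 l cur acc = ((cur.reverse ++ l) :: acc).reverse := by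
  cases fuel with
  | zero => rfl
  | succ n => cases l with
    | nil => simp [PySem.Chars.splitOnMax.go]
    | cons c rest => simp [PySem.Chars.splitOnMax.go]

theorem goDot (fuel m : Nat) (l cur : List Char) (acc : List (List Char)) (hm : m ≠ 0) :
    PySem.Chars.splitOnMax.go ['.'] (fuel+1) m ('.'::l) cur acc
      = PySem.Chars.splitOnMax.go ['.'] fuel (m-1) l [] (cur.reverse :: acc) := by
  simp [PySem.Chars.splitOnMax.go, hm, List.isPrefixOf]

theorem goNoDot (pre : List Char) (hpre : '.' ∉ pre) :
    ∀ (fuel m : Nat) (l cur : List Char) (acc : List (List Char)), m ≠ 0 →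
    PySem.Chars.splitOnMax.go ['.'] (pre.length + fuel + 1) m (pre ++ l) cur acc
      = PySem.Chars.splitOnMax.go ['.'] (fuel + 1) m l (pre.reverse ++ cur) acc := by
  induction pre with
  | nil => intro fuel m l cur acc hm; simp
  | cons c cs ih =>
    intro fuel m l cur acc hm
    have hc : c ≠ '.' := by intro h; exact hpre (h ▸ List.mem_cons_self ..)
    have hcs : '.' ∉ cs := fun h => hpre (List.mem_cons_of_mem _ h)
    have h1 : (c :: cs).length + fuel + 1 = (cs.length + fuel + 1) + 1 := by simp; omega
    rw [h1]
    have step : PySem.Chars.splitOnMax.go ['.'] ((cs.length + fuel + 1) + 1) m ((c :: cs) ++ l) cur acc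
        = PySem.Chars.splitOnMax.go ['.'] (cs.length + fuel + 1) m (cs ++ l) (c :: cur) acc := by
      simp [PySem.Chars.splitOnMax.go, hm, List.isPrefixOf, Ne.symm hc]
    rw [step, ih hcs fuel m l (c :: cur) acc hm]
    simp

theorem splitP (r : List Char) :
    PySem.Chars.splitOnMax ("android.permission.".toList ++ r) ".".toList 2
      = ["android".toList, "permission".toList, r] := by
  have h0 : PySem.Chars.splitOnMax ("android.permission.".toList ++ r) ".".toList 2
      = PySem.Chars.splitOnMax.go ['.'] (("android.permission.".toList ++ r).length + 1) 2
          ("android.permission.".toList ++ r) [] [] := by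
    simp [PySem.Chars.splitOnMax]
  rw [h0]
  have hsh : ("android.permission.".toList ++ r) = "android".toList ++ ('.' :: ("permission".toList ++ '.' :: r)) := by rfl
  have hlen : ("android.permission.".toList ++ r).length + 1 = "android".toList.length + (12 + r.length) + 1 := by
    simp; omega
  rw [hlen, hsh, goNoDot "android".toList (by decide) (12 + r.length) 2 _ [] [] (by omega)]
  rw [goDot _ 2 _ _ _ (by omega)]
  have h3 : 12 + r.length = "permission".toList.length + (1 + r.length) + 1 := by simp; omega
  rw [h3, goNoDot "permission".toList (by decide) (1 + r.length) 1 ('.' :: r) _ _ (by omega)]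
  rw [goDot _ 1 _ _ _ (by omega)]
  rw [goM0]
  simp

theorem pvNorm_eq (v : String) : pvNormA v = pvNormB v := by
  unfold pvNormA pvNormB
  set token := PySem.Str.strip v with htok
  by_cases h0 : token = ""
  · simp [h0]
  · simp only [h0, if_false]
    by_cases h1 : PySem.Str.startswith token "android.permission." = true
    · simp only [h1, if_true]
      rw [PySem.Str.startswith_eq, PySem.Chars.startswith_iff] at h1
      obtain ⟨r, hr⟩ := h1
      replace hr : token.toList = "android.permission.".toList ++ r := hr.symm
      have hsplit : PySem.Chars.splitMax? token.toList ".".toList 2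
          = some ["android".toList, "permission".toList, r] := by
        rw [hr, PySem.Chars.splitMax?, if_neg (by decide)]
        exact congrArg some (splitP r)
      have hbridge := PySem.Str.splitMax?_map token "." 2
      rw [hsplit] at hbridge
      obtain ⟨parts, hp⟩ : ∃ parts, PySem.Str.splitMax? token "." 2 = some parts := by
        cases hq : PySem.Str.splitMax? token "." 2 with
        | none => rw [hq] at hbridge; simp at hbridge
        | some parts => exact ⟨parts, rfl⟩
      rw [hp] at hbridge
      simp only [Option.map_some, Option.some.injEq] at hbridge
      have hslice : (PySem.Str.slice token (some (PySem.Str.len "android.permission.")) none).toList = r := by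
        rw [PySem.Str.toList_slice]
        have h19 : PySem.Str.len "android.permission." = 19 := by
          rw [PySem.Str.len_eq]; rfl
        rw [h19]
        show PySem.List.slice token.toList (some 19) none = r
        rw [PySem.List.slice_from token.toList (by norm_num), hr]
        have h19n : ((19:Int)).toNat = "android.permission.".toList.length := by rfl
        rw [h19n, List.drop_left]
      rcases parts with _ | ⟨a, _ | ⟨b, _ | ⟨c, _ | ⟨d, t⟩⟩⟩⟩ <;> simp at hbridge
      rw [hp]
      have hlast : ((some [a, b, c]).getD ([] : List String)).getLastD "" = c := rfl
      rw [hlast]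
      apply String.toList_inj.mp
      rw [hslice]
      exact hbridge.2.2
    · rw [PySem.Str.startswith_eq] at h1
      simp at h1
      simp [h1]

theorem pvDictItems (f : String → String) :
    ∀ (l processed : List String) (d : PySem.Dict String String),
      d.items = (PySem.Set.ofList processed).map (fun p => (p, f p)) →
      (l.foldl (fun d p => d.insert p (f p)) d).items
        = (PySem.Set.ofList (processed ++ l)).map (fun p => (p, f p)) := by
  intro l
  induction l with
  | nil => intro processed d hd; simpa using hd
  | cons p l ih =>
    intro processed d hd
    rw [List.foldl_cons, List.append_cons]
    apply ih (processed ++ [p])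
    have hkeys : d.keys = PySem.Set.ofList processed := by
      simp [PySem.Dict.keys, hd, Function.comp_def]
    by_cases hp : p ∈ processed
    · have hcont : d.contains p = true := by
        rw [PySem.Dict.contains_eq_decide_mem_keys, hkeys]
        simp [PySem.Set.mem_ofList, hp]
      rw [PySem.Dict.items_insert_of_contains d (f p) hcont, hd]
      have hset : PySem.Set.ofList (processed ++ [p]) = PySem.Set.ofList processed := by
        rw [PySem.Set.ofList_append_singleton, PySem.Set.add]
        rw [if_pos]
        simp only [PySem.Set.contains] at *
        simp [List.contains_iff_mem, PySem.Set.mem_ofList, hp]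
      rw [hset, List.map_map]
      apply List.map_congr_left
      intro q hq
      by_cases hqp : q = p
      · subst hqp; simp
      · simp [Function.comp, hqp]
    · have hcont : d.contains p = false := by
        rw [PySem.Dict.contains_eq_decide_mem_keys, hkeys]
        simp [PySem.Set.mem_ofList, hp]
      rw [PySem.Dict.items_insert_of_not_contains d (f p) hcont, hd]
      have hset : PySem.Set.ofList (processed ++ [p]) = PySem.Set.ofList processed ++ [p] := by
        rw [PySem.Set.ofList_append_singleton, PySem.Set.add, if_neg]
        simp only [PySem.Set.contains]
        simp [List.contains_iff_mem, PySem.Set.mem_ofList, hp]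
      rw [hset]
      simp

theorem pvSetContains (xs : List String) (p : String) :
    PySem.Set.contains (PySem.Set.ofList xs) p = decide (p ∈ xs) := by
  simp [PySem.Set.contains, List.contains_iff_exists_mem_beq, PySem.Set.mem_ofList]

theorem pvOfListAppendMem (xs : List String) (p : String) (hp : p ∈ xs) :
    PySem.Set.ofList (xs ++ [p]) = PySem.Set.ofList xs := by
  rw [PySem.Set.ofList_append_singleton, PySem.Set.add, if_pos]
  rw [pvSetContains]
  simp [hp]

theorem pvOfListAppendNotMem (xs : List String) (p : String) (hp : p ∉ xs) :
    PySem.Set.ofList (xs ++ [p]) = PySem.Set.ofList xs ++ [p] := by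
  rw [PySem.Set.ofList_append_singleton, PySem.Set.add, if_neg]
  rw [pvSetContains]
  simp [hp]

theorem pvBFold (g h : String → Bool) :
    ∀ (l processed : List String),
      l.foldl
        (fun (st : PySem.Set String × List String × List String) perm =>
          let seen := st.1
          let direct := st.2.1
          let adOnly := st.2.2
          if PySem.Set.contains seen perm then st
          else
            let seen' := PySem.Set.add seen perm
            if g perm then (seen', direct ++ [perm], adOnly)
            else if h perm then (seen', direct, adOnly ++ [perm])
            else (seen', direct, adOnly))
        (PySem.Set.ofList processed,
          (PySem.Set.ofList processed).filter g,
          (PySem.Set.ofList processed).filter (fun p => !g p && h p))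
      = (PySem.Set.ofList (processed ++ l),
          (PySem.Set.ofList (processed ++ l)).filter g,
          (PySem.Set.ofList (processed ++ l)).filter (fun p => !g p && h p)) := by
  intro l
  induction l with
  | nil => intro processed; simp
  | cons p l ih =>
    intro processed
    rw [List.foldl_cons, List.append_cons]
    have hstep :
        (fun (st : PySem.Set String × List String × List String) perm =>
          let seen := st.1
          let direct := st.2.1
          let adOnly := st.2.2
          if PySem.Set.contains seen perm then st
          else
            let seen' := PySem.Set.add seen perm
            if g perm then (seen', direct ++ [perm], adOnly)
            else if h perm then (seen', direct, adOnly ++ [perm])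
            else (seen', direct, adOnly))
          (PySem.Set.ofList processed,
            (PySem.Set.ofList processed).filter g,
            (PySem.Set.ofList processed).filter (fun p => !g p && h p)) p
        = (PySem.Set.ofList (processed ++ [p]),
            (PySem.Set.ofList (processed ++ [p])).filter g,
            (PySem.Set.ofList (processed ++ [p])).filter (fun p => !g p && h p)) := by
      by_cases hp : p ∈ processed
      · rw [pvOfListAppendMem _ _ hp]
        simp only [pvSetContains, hp, decide_true, if_true]
      · rw [pvOfListAppendNotMem _ _ hp]
        simp only [pvSetContains, hp, decide_false, Bool.false_eq_true, if_false]
        have hadd : PySem.Set.add (PySem.Set.ofList processed) p = PySem.Set.ofList processed ++ [p] := by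
          rw [PySem.Set.add, if_neg]
          rw [pvSetContains]; simp [hp]
        simp only [hadd, List.filter_append, List.filter_cons, List.filter_nil]
        by_cases hg : g p
        · simp [hg]
        · by_cases hh : h p <;> simp [hg, hh]
    exact (congrArg (fun init => List.foldl
        (fun (st : PySem.Set String × List String × List String) perm =>
          let seen := st.1
          let direct := st.2.1
          let adOnly := st.2.2
          if PySem.Set.contains seen perm then st
          else
            let seen' := PySem.Set.add seen perm
            if g perm then (seen', direct ++ [perm], adOnly)
            else if h perm then (seen', direct, adOnly ++ [perm])
            else (seen', direct, adOnly)) init l) hstep).trans (ih (processed ++ [p]))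

theorem pvExtFold (adid : String → Bool) (matched : List String) :
    ∀ (l processed : List String),
      l.foldl (fun ms p => if adid p && !ms.contains p then ms ++ [p] else ms)
          (matched ++ (PySem.Set.ofList processed).filter (fun p => adid p && !matched.contains p))
        = matched ++ (PySem.Set.ofList (processed ++ l)).filter (fun p => adid p && !matched.contains p) := by
  intro l
  induction l with
  | nil => intro processed; simp
  | cons p l ih =>
    intro processed
    rw [List.foldl_cons, List.append_cons processed p l]
    have hmem : ∀ q (xs : List String), (xs.contains q = true) ↔ q ∈ xs := by
      intro q xs; simp [List.contains_iff_exists_mem_beq]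
    have hstep :
        (if adid p && !(matched ++ (PySem.Set.ofList processed).filter (fun q => adid q && !matched.contains q)).contains p
          then (matched ++ (PySem.Set.ofList processed).filter (fun q => adid q && !matched.contains q)) ++ [p]
          else (matched ++ (PySem.Set.ofList processed).filter (fun q => adid q && !matched.contains q)))
        = matched ++ (PySem.Set.ofList (processed ++ [p])).filter (fun q => adid q && !matched.contains q) := by
      by_cases hp : p ∈ processed
      · have hcf : ¬ ((adid p && !(matched ++ (PySem.Set.ofList processed).filter (fun q => adid q && !matched.contains q)).contains p) = true) := by
          intro hcond
          simp only [Bool.and_eq_true, Bool.not_eq_true', List.contains_append, Bool.or_eq_false_iff] at hcond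
          obtain ⟨had, hncm, hncf⟩ := And.intro hcond.1 (And.intro hcond.2.1 hcond.2.2)
          have hpin : p ∈ (PySem.Set.ofList processed).filter (fun q => adid q && !matched.contains q) := by
            rw [List.mem_filter]
            exact ⟨(PySem.Set.mem_ofList _ _).mpr hp, by simp only [had, hncm, Bool.not_false, Bool.and_self]⟩
          exact absurd ((hmem p _).mpr hpin) (ne_true_of_eq_false hncf)
        rw [if_neg hcf, pvOfListAppendMem _ _ hp]
      · rw [pvOfListAppendNotMem _ _ hp, List.filter_append, List.filter_cons]
        by_cases hcond : (adid p && !(matched ++ (PySem.Set.ofList processed).filter (fun q => adid q && !matched.contains q)).contains p) = true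
        · rw [if_pos hcond]
          simp only [Bool.and_eq_true, Bool.not_eq_true', List.contains_append, Bool.or_eq_false_iff] at hcond
          obtain ⟨had, hnc⟩ := hcond
          have hpm : p ∉ matched := by
            intro hin
            exact absurd ((hmem p matched).mpr hin) (ne_true_of_eq_false hnc.1)
          simp [had, hpm, List.append_assoc]
        · rw [if_neg hcond]
          have hfalse : (adid p && !matched.contains p) = false := by
            cases had : adid p with
            | false => simp
            | true =>
              have hct : (matched ++ (PySem.Set.ofList processed).filter (fun q => adid q && !matched.contains q)).contains p = true := by
                revert hcond
                cases hc2 : (matched ++ (PySem.Set.ofList processed).filter (fun q => adid q && !matched.contains q)).contains p <;>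
                  simp [had, hc2]
              simp only [List.contains_append, Bool.or_eq_true] at hct
              cases hct with
              | inl hm => simp [(hmem p matched).mp hm]
              | inr hf =>
                exfalso
                have := (hmem p _).mp hf
                rw [List.mem_filter] at this
                exact hp ((PySem.Set.mem_ofList _ _).mp this.1)
          simp only [List.filter_nil, hfalse, Bool.false_eq_true, if_false, List.append_nil]
    rw [hstep]
    exact ih (processed ++ [p])

theorem pvMain (declared candidates : List String) :
    match_permissions_py declared candidates = match_permissions_py_alt declared candidates := by
  by_cases hd : declared = []
  · subst hd; rfl
  · -- names
    have hmem : ∀ q (xs : List String), (xs.contains q = true) ↔ q ∈ xs := by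
      intro q xs; simp [List.contains_iff_exists_mem_beq]
    -- B-side characterization
    have hB := pvBFold
        (fun p => PySem.Set.contains (PySem.Set.ofList (candidates.map PySem.Str.upper)) (PySem.Str.upper (pvNormB p)))
        (fun p => PySem.Set.contains (PySem.Set.ofList (candidates.map PySem.Str.upper)) "AD_ID" && PySem.Str.isIn "AD_ID" (PySem.Str.upper p))
        declared []
    simp only [List.nil_append] at hB
    have hinit : (PySem.Set.ofList ([] : List String), ([] : List String), ([] : List String))
        = ((PySem.Set.ofList ([] : List String)),
           (PySem.Set.ofList ([] : List String)).filter (fun p => PySem.Set.contains (PySem.Set.ofList (candidates.map PySem.Str.upper)) (PySem.Str.upper (pvNormB p))),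
           (PySem.Set.ofList ([] : List String)).filter (fun p => !(PySem.Set.contains (PySem.Set.ofList (candidates.map PySem.Str.upper)) (PySem.Str.upper (pvNormB p))) && (PySem.Set.contains (PySem.Set.ofList (candidates.map PySem.Str.upper)) "AD_ID" && PySem.Str.isIn "AD_ID" (PySem.Str.upper p)))) := rfl
    have hBchar : match_permissions_py_alt declared candidates
        = (List.foldl
            (fun (st : PySem.Set String × List String × List String) perm =>
              let seen := st.1
              let direct := st.2.1
              let adOnly := st.2.2
              if PySem.Set.contains seen perm then st
              else
                let seen' := PySem.Set.add seen perm
                if PySem.Set.contains (PySem.Set.ofList (candidates.map PySem.Str.upper)) (PySem.Str.upper (pvNormB perm)) then (seen', direct ++ [perm], adOnly)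
                else if PySem.Set.contains (PySem.Set.ofList (candidates.map PySem.Str.upper)) "AD_ID" && PySem.Str.isIn "AD_ID" (PySem.Str.upper perm) then (seen', direct, adOnly ++ [perm])
                else (seen', direct, adOnly))
            (PySem.Set.ofList ([] : List String), ([] : List String), ([] : List String)) declared).2.1
          ++ (List.foldl
            (fun (st : PySem.Set String × List String × List String) perm =>
              let seen := st.1
              let direct := st.2.1
              let adOnly := st.2.2
              if PySem.Set.contains seen perm then st
              else
                let seen' := PySem.Set.add seen perm
                if PySem.Set.contains (PySem.Set.ofList (candidates.map PySem.Str.upper)) (PySem.Str.upper (pvNormB perm)) then (seen', direct ++ [perm], adOnly)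
                else if PySem.Set.contains (PySem.Set.ofList (candidates.map PySem.Str.upper)) "AD_ID" && PySem.Str.isIn "AD_ID" (PySem.Str.upper perm) then (seen', direct, adOnly ++ [perm])
                else (seen', direct, adOnly))
            (PySem.Set.ofList ([] : List String), ([] : List String), ([] : List String)) declared).2.2 := rfl
    rw [hinit, hB] at hBchar
    -- A-side characterization
    have hitems := pvDictItems (fun p => PySem.Str.upper (pvNormA p)) declared [] PySem.Dict.empty rfl
    simp only [List.nil_append] at hitems
    have hAchar : match_permissions_py declared candidates
        = (if PySem.Set.contains (PySem.Set.ofList (candidates.map PySem.Str.upper)) "AD_ID" then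
            List.foldl
              (fun ms perm =>
                if PySem.Str.isIn "AD_ID" (PySem.Str.upper perm) && !ms.contains perm then ms ++ [perm]
                else ms)
              ((List.filter (fun ps => PySem.Set.contains (PySem.Set.ofList (candidates.map PySem.Str.upper)) ps.2)
                  (List.foldl (fun d perm => d.insert perm (PySem.Str.upper (pvNormA perm))) PySem.Dict.empty declared).items).map Prod.fst)
              declared
          else
            (List.filter (fun ps => PySem.Set.contains (PySem.Set.ofList (candidates.map PySem.Str.upper)) ps.2)
                (List.foldl (fun d perm => d.insert perm (PySem.Str.upper (pvNormA perm))) PySem.Dict.empty declared).items).map Prod.fst) := by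
      unfold match_permissions_py
      rw [if_neg hd]
    have hmatched : (List.filter (fun ps => PySem.Set.contains (PySem.Set.ofList (candidates.map PySem.Str.upper)) ps.2)
          (List.foldl (fun d perm => d.insert perm (PySem.Str.upper (pvNormA perm))) PySem.Dict.empty declared).items).map Prod.fst
        = (PySem.Set.ofList declared).filter (fun p => PySem.Set.contains (PySem.Set.ofList (candidates.map PySem.Str.upper)) (PySem.Str.upper (pvNormA p))) := by
      rw [hitems]
      rw [List.filter_map, List.map_map]
      simp [Function.comp_def]
    have hnorm : ∀ p, PySem.Str.upper (pvNormA p) = PySem.Str.upper (pvNormB p) := by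
      intro p; rw [pvNorm_eq]
    rw [hAchar, hBchar, hmatched]
    simp only [hnorm]
    by_cases had : PySem.Set.contains (PySem.Set.ofList (candidates.map PySem.Str.upper)) "AD_ID" = true
    · rw [if_pos had]
      have hstart : (PySem.Set.ofList declared).filter (fun p => PySem.Set.contains (PySem.Set.ofList (candidates.map PySem.Str.upper)) (PySem.Str.upper (pvNormB p)))
          = (PySem.Set.ofList declared).filter (fun p => PySem.Set.contains (PySem.Set.ofList (candidates.map PySem.Str.upper)) (PySem.Str.upper (pvNormB p)))
            ++ (PySem.Set.ofList ([] : List String)).filter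
                (fun p => PySem.Str.isIn "AD_ID" (PySem.Str.upper p)
                  && !((PySem.Set.ofList declared).filter (fun q => PySem.Set.contains (PySem.Set.ofList (candidates.map PySem.Str.upper)) (PySem.Str.upper (pvNormB q)))).contains p) := by
        simp
      rw [hstart, pvExtFold (fun p => PySem.Str.isIn "AD_ID" (PySem.Str.upper p)) _ declared []]
      simp only [List.nil_append]
      congr 1
      apply List.filter_congr
      intro p hp
      have hpin : p ∈ declared := (PySem.Set.mem_ofList _ _).mp hp
      have hcc : ((PySem.Set.ofList declared).filter (fun q => PySem.Set.contains (PySem.Set.ofList (candidates.map PySem.Str.upper)) (PySem.Str.upper (pvNormB q)))).contains p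
          = PySem.Set.contains (PySem.Set.ofList (candidates.map PySem.Str.upper)) (PySem.Str.upper (pvNormB p)) := by
        cases hg : PySem.Set.contains (PySem.Set.ofList (candidates.map PySem.Str.upper)) (PySem.Str.upper (pvNormB p)) with
        | true =>
          rw [hmem]
          rw [List.mem_filter]
          exact ⟨hp, hg⟩
        | false =>
          rw [Bool.eq_false_iff]
          intro hcontr
          rw [hmem, List.mem_filter] at hcontr
          rw [hcontr.2] at hg
          simp at hg
      rw [hcc, had]
      cases PySem.Set.contains (PySem.Set.ofList (candidates.map PySem.Str.upper)) (PySem.Str.upper (pvNormB p)) <;>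
        cases PySem.Str.isIn "AD_ID" (PySem.Str.upper p) <;> rfl
    · rw [if_neg had]
      rw [Bool.not_eq_true] at had
      simp only [had, Bool.false_and, Bool.and_false]
      simp

-- ===== VERDICT (by name: the statement is the Claim_ definition above) =====
theorem match_permissions_py_spec : Claim_equal_match_permissions_py := by
  intro declared candidates _
  unfold Spec_match_permissions_py
  exact pvMain declared candidates
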